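-- pv_equiv track=rewrite | github.com/3tilley/Suspension | alphabet.py | charlotte
-- ===== SOURCE A (Python) =====
-- def charlotte(letters):
--     name = "CHARLOTTE"
--     matching_letters = 0
--     non_dupicles = set()
--     for letter in letters:
--         for charlotte_letter in name:
--             if letter == charlotte_letter:
--                 non_dupicles.add(letter)
--
--     return len(non_dupicles)
-- ===== SOURCE B (Python) =====
-- def charlotte(letters):
--     # Count, over the distinct letters of the name, those that occur in the input.
--     return sum(1 for c in dict.fromkeys("CHARLOTTE") if c in letters)
-- ===== Notes on version B (the rewrite author's own statement) =====
-- stated objective: faster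
-- what changed: Instead of scanning the input and accumulating matching letters into a set, B never builds a set: it loops over the fixed deduplicated name (8 letters) and counts those present in the input via substring tests, so the inner work is a C-level substring scan rather than a Python-level nested loop with set insertion.
import Mathlib
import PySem

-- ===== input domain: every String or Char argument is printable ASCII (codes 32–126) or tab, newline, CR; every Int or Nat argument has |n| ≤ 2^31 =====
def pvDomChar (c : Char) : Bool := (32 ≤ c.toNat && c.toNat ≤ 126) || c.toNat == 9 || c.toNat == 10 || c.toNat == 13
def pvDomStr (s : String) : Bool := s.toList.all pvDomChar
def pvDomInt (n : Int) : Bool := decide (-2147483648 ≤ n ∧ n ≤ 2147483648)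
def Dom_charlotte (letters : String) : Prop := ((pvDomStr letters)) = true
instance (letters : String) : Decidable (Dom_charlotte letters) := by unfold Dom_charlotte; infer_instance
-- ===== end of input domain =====

-- B loops over the deduplicated name counting letters that occur in the input via substring tests, instead of A's scan of the input accumulating matches into a set; measured constant-factor speedup (C-level substring scan vs Python-level nested loop).


-- ===== PORT A =====
-- for letter in letters: for charlotte_letter in name: if letter == charlotte_letter: non_dupicles.add(letter)
def charlotte (letters : String) : Int :=
  let name : String := "CHARLOTTE"
  let non_dupicles : PySem.Set Char :=
    letters.toList.foldl
      (fun s letter =>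
        name.toList.foldl
          (fun s charlotte_letter =>
            if letter == charlotte_letter then PySem.Set.add s letter else s)
          s)
      PySem.Set.empty
  PySem.Set.len non_dupicles

-- ===== PORT B =====
-- sum(1 for c in dict.fromkeys("CHARLOTTE") if c in letters)
def charlotte_alt (letters : String) : Int :=
  ((PySem.List.dedup "CHARLOTTE".toList).map
    (fun c => if PySem.Str.isIn (String.ofList [c]) letters then (1 : Int) else 0)).sum

-- ===== PRECONDITION & SPEC =====
def Spec_charlotte (letters : String) (out : Int) : Prop := out = charlotte_alt letters
instance (letters : String) (out : Int) : Decidable (Spec_charlotte letters out) := by unfold Spec_charlotte; infer_instance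

-- ===== CLAIM =====
def Claim_equal_charlotte : Prop := ∀ (letters : String), Dom_charlotte letters → Spec_charlotte letters (charlotte letters)

-- ===== LEMMAS AND PROOFS =====

-- a one-character substring occurs iff the character is a member
theorem singleton_infix_iff_mem (c : Char) (l : List Char) : [c] <:+: l ↔ c ∈ l := by
  constructor
  · intro h; exact h.subset (List.mem_singleton_self c)
  · intro h
    obtain ⟨s, t, rfl⟩ := List.append_of_mem h
    exact ⟨s, t, by simp⟩

-- A's inner loop over the name adds `letter` exactly when it occurs in the name.
theorem charlotte_inner (n : List Char) (letter : Char) (s : PySem.Set Char) :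
    n.foldl (fun s c => if letter == c then PySem.Set.add s letter else s) s
      = if letter ∈ n then PySem.Set.add s letter else s := by
  induction n generalizing s with
  | nil => simp
  | cons c cs ih =>
    simp only [List.foldl_cons, ih, List.mem_cons]
    by_cases h : letter = c
    · subst h
      simp [PySem.Set.add_eq_ite]
      split_ifs <;> simp_all
    · simp [beq_iff_eq, h]

-- Membership in A's accumulated set.
theorem charlotte_outer_mem (xs n : List Char) (s : PySem.Set Char) (y : Char) :
    y ∈ xs.foldl (fun s l => if l ∈ n then PySem.Set.add s l else s) s
      ↔ y ∈ s ∨ (y ∈ xs ∧ y ∈ n) := by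
  induction xs generalizing s with
  | nil => simp
  | cons x xs ih =>
    simp only [List.foldl_cons, ih, List.mem_cons]
    by_cases h : x ∈ n
    · simp [h, PySem.Set.mem_add]
      constructor
      · rintro (((h1 | h1) | h1) | h1) <;> first | tauto | (subst h1; tauto)
      · rintro (h1 | ⟨(h1 | h1), _⟩) <;> tauto
    · simp [h]
      constructor
      · rintro (h1 | h1) <;> tauto
      · rintro (h1 | ⟨(h1 | h1), h2⟩) <;> first | tauto | (subst h1; tauto)

-- A's accumulated set stays duplicate-free.
theorem charlotte_outer_nodup (xs n : List Char) (s : PySem.Set Char) (hs : s.Nodup) :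
    (xs.foldl (fun s l => if l ∈ n then PySem.Set.add s l else s) s).Nodup := by
  induction xs generalizing s with
  | nil => simpa
  | cons x xs ih =>
    simp only [List.foldl_cons]
    by_cases h : x ∈ n
    · simp only [h, if_true]
      exact ih _ (PySem.Set.nodup_add _ _ hs)
    · simp only [h, if_false]
      exact ih _ hs

-- ===== VERDICT =====
theorem charlotte_spec : Claim_equal_charlotte := by
  intro letters _
  unfold Spec_charlotte charlotte charlotte_alt PySem.Set.len
  simp only
  -- rewrite A's nested loop into a single conditional-add loop
  have hA : ∀ (xs : List Char) (s : PySem.Set Char),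
      xs.foldl
        (fun s letter =>
          ("CHARLOTTE".toList).foldl
            (fun s c => if letter == c then PySem.Set.add s letter else s) s) s
      = xs.foldl
          (fun s l => if l ∈ "CHARLOTTE".toList then PySem.Set.add s l else s) s := by
    intro xs
    induction xs with
    | nil => intro s; rfl
    | cons x xs ih =>
      intro s
      simp only [List.foldl_cons, charlotte_inner]
  rw [hA]
  -- rewrite B's 0/1-sum into a countP, then a filter length
  have hiff : ∀ c : Char,
      PySem.Str.isIn (String.ofList [c]) letters = decide (c ∈ letters.toList) := by
    intro c
    by_cases h : c ∈ letters.toList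
    · have hi : PySem.Str.isIn (String.ofList [c]) letters = true := by
        rw [PySem.Str.isIn_iff_infix]
        simpa [singleton_infix_iff_mem] using h
      simp only [h, decide_true]
      simpa using hi
    · have hi : PySem.Str.isIn (String.ofList [c]) letters = false := by
        rw [Bool.eq_false_iff]
        rw [Ne, PySem.Str.isIn_iff_infix]
        simpa [singleton_infix_iff_mem] using h
      simp only [h, decide_false]
      simpa using hi
  have hB : ((PySem.List.dedup "CHARLOTTE".toList).map
        (fun c => if PySem.Str.isIn (String.ofList [c]) letters then (1 : Int) else 0)).sum
      = (((PySem.List.dedup "CHARLOTTE".toList).filter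
            (fun c => decide (c ∈ letters.toList))).length : Int) := by
    rw [PySem.List.sum_map_ite_one_zero, ← List.countP_eq_length_filter]
    congr 1
    exact List.countP_congr (fun c _ => by rw [hiff c])
  rw [hB]
  congr 1
  apply List.Perm.length_eq
  refine (List.perm_ext_iff_of_nodup
        (charlotte_outer_nodup _ _ PySem.Set.empty List.nodup_nil)
        ((PySem.List.nodup_dedup _).filter _)).mpr ?_
  intro y
  rw [charlotte_outer_mem]
  simp [PySem.List.mem_dedup, PySem.Set.empty, and_comm]
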